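-- pv_equiv track=rewrite | github.com/alexblad/AdventofCode | Aoc2025/Day2/BenchmarkSolutions.py | solve_string
-- ===== SOURCE A (Python) =====
-- def solve_string(ranges):
--     count = 0
--     for r in ranges:
--         for id in range(r[0], r[1] +1):
--             s = str(id)
--             d = s + s
--             if s in d[1:-1]:
--                 count += 1
--     return count
-- ===== SOURCE B (Python) =====
-- def solve_string(ranges):
--     def periodic(n):
--         s = str(n)
--         return any(s[k:] + s[:k] == s for k in range(1, len(s)))
--     return sum(periodic(n) for a, b in ranges for n in range(a, b + 1))
-- ===== Notes on version B (the rewrite author's own statement) =====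
-- stated objective: alternative
-- what changed: B drops A's doubled-string substring trick and instead tests each nontrivial cyclic rotation of the decimal string for equality, flattening A's nested counting loops into a single sum over a generator.
import Mathlib
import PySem

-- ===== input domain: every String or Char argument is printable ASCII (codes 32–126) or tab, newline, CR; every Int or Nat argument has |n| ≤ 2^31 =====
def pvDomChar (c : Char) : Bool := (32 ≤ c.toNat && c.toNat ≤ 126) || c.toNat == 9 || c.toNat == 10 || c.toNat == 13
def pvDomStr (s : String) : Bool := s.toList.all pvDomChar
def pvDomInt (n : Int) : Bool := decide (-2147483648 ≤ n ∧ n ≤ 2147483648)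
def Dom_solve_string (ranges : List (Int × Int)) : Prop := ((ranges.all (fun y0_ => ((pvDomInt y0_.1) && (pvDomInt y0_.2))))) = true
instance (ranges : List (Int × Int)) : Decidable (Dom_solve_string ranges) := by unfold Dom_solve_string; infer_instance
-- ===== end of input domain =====

-- B replaces A's doubled-string substring test by a direct check of all nontrivial cyclic
-- rotations of the decimal string, and flattens the nested counting loops into one sum
-- (objective: alternative; same asymptotic cost).


-- ===== PORT A =====
-- loop body of A: s = str(id); d = s + s; s in d[1:-1]
def pvCheckA (id : Int) : Bool :=
  let s := PySem.Int.toStr id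
  let d := s ++ s
  PySem.Str.isIn s (PySem.Str.slice d (some 1) (some (-1)))

def solve_string (ranges : List (Int × Int)) : Int :=
  ranges.foldl (fun count r =>
    (PySem.List.pyRange r.1 (r.2 + 1)).foldl (fun count id =>
      if pvCheckA id then count + 1 else count) count) 0

-- ===== PORT B =====
-- B's helper periodic(n): any(s[k:] + s[:k] == s for k in range(1, len(s)))
def pvPeriodic (n : Int) : Bool :=
  let s := PySem.Int.toStr n
  (PySem.List.pyRange 1 (PySem.Str.len s)).any (fun k =>
    PySem.Str.slice s (some k) none ++ PySem.Str.slice s none (some k) == s)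

-- sum(periodic(n) for a, b in ranges for n in range(a, b + 1))
def solve_string_alt (ranges : List (Int × Int)) : Int :=
  ((ranges.flatMap (fun r => PySem.List.pyRange r.1 (r.2 + 1))).map
    (fun n => if pvPeriodic n then (1 : Int) else 0)).foldl (· + ·) 0

-- ===== PRECONDITION & SPEC =====
def Spec_solve_string (ranges : List (Int × Int)) (out : Int) : Prop := out = solve_string_alt ranges
instance (ranges : List (Int × Int)) (out : Int) : Decidable (Spec_solve_string ranges out) := by unfold Spec_solve_string; infer_instance

-- ===== CLAIM (what is proved, stated in full; the proofs are below) =====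
def Claim_equal_solve_string : Prop := ∀ (ranges : List (Int × Int)), Dom_solve_string ranges → Spec_solve_string ranges (solve_string ranges)

-- ===== LEMMAS AND PROOFS =====

-- d[1:-1] on lists is tail-then-dropLast
theorem pv_slice_one_negone {α : Type} (xs : List α) :
    PySem.List.slice xs (some 1) (some (-1)) = xs.tail.dropLast := by
  unfold PySem.List.slice PySem.List.clampIdx
  cases xs with
  | nil => simp
  | cons a l =>
    simp [List.dropLast_eq_take]
    split_ifs with h1
    · omega
    · simp

theorem pv_drop_dropLast {α : Type} (l : List α) (i : Nat) :
    l.dropLast.drop i = (l.drop i).dropLast := by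
  simp only [List.dropLast_eq_take, List.drop_take, List.length_drop]
  congr 1
  omega

-- the combinatorial core: s occurs inside (s+s)[1:-1] iff some nontrivial rotation of s equals s
theorem pv_core (t : List Char) (ht : t ≠ []) :
    ((∃ j, t <+: ((t ++ t).tail.dropLast).drop j) ↔
      ∃ k : Nat, 1 ≤ k ∧ k < t.length ∧ t.drop k ++ t.take k = t) := by
  have hL : 1 ≤ t.length := List.length_pos_iff.mpr ht
  constructor
  · rintro ⟨j, hpre⟩
    set k := j + 1 with hkdef
    have hlen := hpre.length_le
    rw [pv_drop_dropLast, List.drop_tail] at hpre hlen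
    simp [List.length_dropLast, List.length_drop, List.length_append] at hlen
    have hk2 : k < t.length := by omega
    have hk1 : 1 ≤ k := by omega
    refine ⟨k, hk1, hk2, ?_⟩
    rw [show j + 1 = k from rfl, List.drop_append_of_le_length (by omega),
        List.dropLast_append_of_ne_nil ht] at hpre
    have := List.prefix_iff_eq_take.mp hpre
    rw [List.take_append] at this
    simp [List.length_drop] at this
    rw [List.dropLast_eq_take, List.take_take] at this
    have h2 : min (t.length - (t.length - k)) (t.length - 1) = k := by omega
    rw [h2, List.take_of_length_le (by simp)] at this
    exact this.symm
  · rintro ⟨k, hk1, hk2, hrot⟩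
    refine ⟨k - 1, ?_⟩
    rw [pv_drop_dropLast, List.drop_tail]
    rw [show k - 1 + 1 = k by omega, List.drop_append_of_le_length (by omega),
        List.dropLast_append_of_ne_nil ht]
    rw [List.prefix_iff_eq_take, List.take_append]
    simp [List.length_drop]
    rw [List.dropLast_eq_take, List.take_take]
    have h2 : min (t.length - (t.length - k)) (t.length - 1) = k := by omega
    rw [h2, List.take_of_length_le (by simp)]
    exact hrot.symm

-- str(n) is never the empty string
theorem pv_toChars_ne_nil (n : Int) : PySem.Int.toChars n ≠ [] := by
  unfold PySem.Int.toChars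
  split
  · simp
  · have h := @Nat.length_toDigits_pos 10 n.toNat
    intro he
    rw [he] at h
    simp at h

-- per-number agreement of the two loop-body tests
theorem pv_check_eq (id : Int) : pvCheckA id = pvPeriodic id := by
  have ht := pv_toChars_ne_nil id
  rw [Bool.eq_iff_iff]
  unfold pvCheckA pvPeriodic
  simp only [PySem.Str.isIn_eq, PySem.Str.toList_slice, PySem.Chars.slice_eq_listSlice,
    String.toList_append, PySem.Int.toList_toStr, pv_slice_one_negone, PySem.Str.len_eq,
    List.any_eq_true, PySem.List.mem_pyRange_one, beq_iff_eq]
  rw [← PySem.Chars.exists_prefix_drop_iff_isIn, pv_core _ ht]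
  constructor
  · rintro ⟨k, hk1, hk2, hrot⟩
    refine ⟨(k : Int), ⟨by exact_mod_cast hk1, by exact_mod_cast hk2⟩, ?_⟩
    apply String.toList_inj.mp
    simp only [String.toList_append, PySem.Str.toList_slice, PySem.Chars.slice_eq_listSlice,
      PySem.Int.toList_toStr]
    rw [PySem.List.slice_from _ (by positivity), PySem.List.slice_to _ (by positivity)]
    simpa using hrot
  · rintro ⟨k, ⟨hk1, hk2⟩, heq⟩
    have h0 : (0 : Int) ≤ k := by omega
    refine ⟨k.toNat, by omega, by omega, ?_⟩
    have := congrArg String.toList heq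
    simp only [String.toList_append, PySem.Str.toList_slice, PySem.Chars.slice_eq_listSlice,
      PySem.Int.toList_toStr] at this
    rw [PySem.List.slice_from _ h0, PySem.List.slice_to _ h0] at this
    exact this

theorem pv_sum_flatMap (l : List (Int × Int)) (h : (Int × Int) → List Int) :
    (l.flatMap h).sum = (l.map (fun a => (h a).sum)).sum := by
  induction l with
  | nil => simp
  | cons x xs ih => simp [List.sum_append, ih]

theorem solve_string_eq (ranges : List (Int × Int)) :
    solve_string ranges = solve_string_alt ranges := by
  unfold solve_string solve_string_alt
  rw [← List.sum_eq_foldl]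
  simp only [PySem.List.foldl_if_add_one, PySem.List.foldl_add, List.map_flatMap,
    pv_sum_flatMap, PySem.List.sum_map_ite_one_zero]
  rw [funext pv_check_eq]
  simp

-- ===== VERDICT (by name: the statement is the Claim_ definition above) =====
theorem solve_string_spec : Claim_equal_solve_string := by
  intro ranges _
  unfold Spec_solve_string
  exact solve_string_eq ranges
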